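-- pv_equiv track=rewrite | github.com/zehuiluo/RAG_interactiveAI_MSADS | app.py | parse_followups
-- ===== SOURCE A (Python) =====
-- TOPIC_FOLLOWUPS = {
--     "curriculum":  [
--         "What electives are available?",
--         "Tell me about Machine Learning I and II.",
--         "What is the capstone project?",
--     ],
--     "admissions":  [
--         "When is the application deadline?",
--         "How much does the program cost?",
--         "What are the English language requirements?",
--     ],
--     "tuition":     [
--         "Are there scholarships available?",
--         "What is the 18-course thesis track cost?",
--         "When is the application deadline?",
--     ],
--     "careers":     [
--         "Is the program STEM OPT eligible?",
--         "What companies hire MSADS graduates?",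
--         "Can I work while studying?",
--     ],
--     "visa":        [
--         "Can I study online as an international student?",
--         "What is Curricular Practical Training (CPT)?",
--         "Does the online program offer visa sponsorship?",
--     ],
--     "format":      [
--         "Can I study part-time?",
--         "Where are classes held in Chicago?",
--         "Can I study online instead?",
--     ],
--     "capstone":    [
--         "What are the 6 core courses?",
--         "How long does the program take?",
--         "What careers do graduates pursue?",
--     ],
--     "default":     [
--         "What are the 6 core courses?",
--         "What are the admission requirements?",
--         "What careers do graduates pursue?",
--     ],
-- }
--
-- def parse_followups(text, query=""):
--     """Return clean answer + topic-relevant follow-up questions."""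
--     # Remove any FOLLOWUPS line Llama may have added anyway
--     clean = text.split("FOLLOWUPS:")[0].strip() if "FOLLOWUPS:" in text else text.strip()
--     ql = query.lower()
--     if any(w in ql for w in ["visa","opt","stem","f-1","international","cpt"]):
--         followups = TOPIC_FOLLOWUPS["visa"]
--     elif any(w in ql for w in ["capstone","project","showcase","thesis"]):
--         followups = TOPIC_FOLLOWUPS["capstone"]
--     elif any(w in ql for w in ["career","job","outcome","employer","hire","salary"]):
--         followups = TOPIC_FOLLOWUPS["careers"]
--     elif any(w in ql for w in ["cost","tuition","fee","scholarship","price","afford"]):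
--         followups = TOPIC_FOLLOWUPS["tuition"]
--     elif any(w in ql for w in ["admit","apply","require","letter","statement","deadline","toefl","gre"]):
--         followups = TOPIC_FOLLOWUPS["admissions"]
--     elif any(w in ql for w in ["online","in-person","part-time","full-time","schedule","chicago","evening","study"]):
--         followups = TOPIC_FOLLOWUPS["format"]
--     elif any(w in ql for w in ["course","curriculum","elective","machine learning","python","data","core","nlp","deep"]):
--         followups = TOPIC_FOLLOWUPS["curriculum"]
--     else:
--         followups = TOPIC_FOLLOWUPS["default"]
--     return clean, followups
-- ===== SOURCE B (Python) =====
-- TOPIC_FOLLOWUPS = {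
--     "curriculum":  [
--         "What electives are available?",
--         "Tell me about Machine Learning I and II.",
--         "What is the capstone project?",
--     ],
--     "admissions":  [
--         "When is the application deadline?",
--         "How much does the program cost?",
--         "What are the English language requirements?",
--     ],
--     "tuition":     [
--         "Are there scholarships available?",
--         "What is the 18-course thesis track cost?",
--         "When is the application deadline?",
--     ],
--     "careers":     [
--         "Is the program STEM OPT eligible?",
--         "What companies hire MSADS graduates?",
--         "Can I work while studying?",
--     ],
--     "visa":        [
--         "Can I study online as an international student?",
--         "What is Curricular Practical Training (CPT)?",
--         "Does the online program offer visa sponsorship?",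
--     ],
--     "format":      [
--         "Can I study part-time?",
--         "Where are classes held in Chicago?",
--         "Can I study online instead?",
--     ],
--     "capstone":    [
--         "What are the 6 core courses?",
--         "How long does the program take?",
--         "What careers do graduates pursue?",
--     ],
--     "default":     [
--         "What are the 6 core courses?",
--         "What are the admission requirements?",
--         "What careers do graduates pursue?",
--     ],
-- }
--
-- # Topics by priority rank; rank 7 = no keyword matched.
-- TOPICS = ["visa", "capstone", "careers", "tuition", "admissions",
--           "format", "curriculum", "default"]
--
-- # Inverted index: keyword -> priority rank of its topic (alphabetical).
-- KEYWORD_RANK = {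
--     "admit": 4,
--     "afford": 3,
--     "apply": 4,
--     "capstone": 1,
--     "career": 2,
--     "chicago": 5,
--     "core": 6,
--     "cost": 3,
--     "course": 6,
--     "cpt": 0,
--     "curriculum": 6,
--     "data": 6,
--     "deadline": 4,
--     "deep": 6,
--     "elective": 6,
--     "employer": 2,
--     "evening": 5,
--     "f-1": 0,
--     "fee": 3,
--     "full-time": 5,
--     "gre": 4,
--     "hire": 2,
--     "in-person": 5,
--     "international": 0,
--     "job": 2,
--     "letter": 4,
--     "machine learning": 6,
--     "nlp": 6,
--     "online": 5,
--     "opt": 0,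
--     "outcome": 2,
--     "part-time": 5,
--     "price": 3,
--     "project": 1,
--     "python": 6,
--     "require": 4,
--     "salary": 2,
--     "schedule": 5,
--     "scholarship": 3,
--     "showcase": 1,
--     "statement": 4,
--     "stem": 0,
--     "study": 5,
--     "thesis": 1,
--     "toefl": 4,
--     "tuition": 3,
--     "visa": 0,
-- }
--
-- def parse_followups(text, query=""):
--     """Return clean answer + topic-relevant follow-up questions."""
--     clean = text.split("FOLLOWUPS:")[0].strip() if "FOLLOWUPS:" in text else text.strip()
--     ql = query.lower()
--     # Scan the inverted index once, keeping the best (lowest) rank seen.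
--     best = 7
--     for kw, rank in KEYWORD_RANK.items():
--         if kw in ql and rank < best:
--             best = rank
--     return clean, TOPIC_FOLLOWUPS[TOPICS[best]]
-- ===== Notes on version B (the rewrite author's own statement) =====
-- stated objective: alternative
-- what changed: The seven-branch if/elif ladder over keyword groups is replaced by an inverted index keyword->priority-rank dict stored in alphabetical order, scanned once while tracking the minimum rank seen; the topic is then read off a rank-indexed list, correct because the first matching group in A's priority order is exactly the minimum rank among all matching keywords.
import Mathlib
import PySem

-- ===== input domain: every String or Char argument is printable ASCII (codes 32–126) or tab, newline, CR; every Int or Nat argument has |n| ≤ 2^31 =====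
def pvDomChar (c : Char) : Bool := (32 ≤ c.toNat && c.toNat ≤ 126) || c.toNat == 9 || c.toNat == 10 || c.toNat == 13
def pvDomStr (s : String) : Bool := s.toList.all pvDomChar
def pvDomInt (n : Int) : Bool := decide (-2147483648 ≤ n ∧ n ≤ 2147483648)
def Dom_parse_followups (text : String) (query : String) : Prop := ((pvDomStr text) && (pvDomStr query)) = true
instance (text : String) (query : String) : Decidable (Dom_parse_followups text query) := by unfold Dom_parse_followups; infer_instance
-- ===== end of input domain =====

-- B replaces A's if/elif keyword-group ladder by an inverted index (keyword → priority
-- rank, stored alphabetically) scanned once keeping the minimum rank; objective: alternative.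

-- ===== PORT A =====
def followupsVisa : List String :=
  ["Can I study online as an international student?",
   "What is Curricular Practical Training (CPT)?",
   "Does the online program offer visa sponsorship?"]
def followupsCapstone : List String :=
  ["What are the 6 core courses?",
   "How long does the program take?",
   "What careers do graduates pursue?"]
def followupsCareers : List String :=
  ["Is the program STEM OPT eligible?",
   "What companies hire MSADS graduates?",
   "Can I work while studying?"]
def followupsTuition : List String :=
  ["Are there scholarships available?",
   "What is the 18-course thesis track cost?",
   "When is the application deadline?"]
def followupsAdmissions : List String :=
  ["When is the application deadline?",
   "How much does the program cost?",
   "What are the English language requirements?"]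
def followupsFormat : List String :=
  ["Can I study part-time?",
   "Where are classes held in Chicago?",
   "Can I study online instead?"]
def followupsCurriculum : List String :=
  ["What electives are available?",
   "Tell me about Machine Learning I and II.",
   "What is the capstone project?"]
def followupsDefault : List String :=
  ["What are the 6 core courses?",
   "What are the admission requirements?",
   "What careers do graduates pursue?"]

def parse_followups (text : String) (query : String) : String × List String :=
  let clean : String :=
    if PySem.Str.isIn "FOLLOWUPS:" text then
      PySem.Str.strip (((PySem.Str.split? text "FOLLOWUPS:").getD []).headD "")
    else PySem.Str.strip text
  let ql := PySem.Str.lower query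
  let followups : List String :=
    if ["visa","opt","stem","f-1","international","cpt"].any (fun w => PySem.Str.isIn w ql) then
      followupsVisa
    else if ["capstone","project","showcase","thesis"].any (fun w => PySem.Str.isIn w ql) then
      followupsCapstone
    else if ["career","job","outcome","employer","hire","salary"].any (fun w => PySem.Str.isIn w ql) then
      followupsCareers
    else if ["cost","tuition","fee","scholarship","price","afford"].any (fun w => PySem.Str.isIn w ql) then
      followupsTuition
    else if ["admit","apply","require","letter","statement","deadline","toefl","gre"].any (fun w => PySem.Str.isIn w ql) then
      followupsAdmissions
    else if ["online","in-person","part-time","full-time","schedule","chicago","evening","study"].any (fun w => PySem.Str.isIn w ql) then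
      followupsFormat
    else if ["course","curriculum","elective","machine learning","python","data","core","nlp","deep"].any (fun w => PySem.Str.isIn w ql) then
      followupsCurriculum
    else followupsDefault
  (clean, followups)

-- ===== PORT B =====
-- TOPIC_FOLLOWUPS[t] (literal dict lookup on the seven fixed topic names)
def topicFollowups (t : String) : List String :=
  if t = "curriculum" then followupsCurriculum
  else if t = "admissions" then followupsAdmissions
  else if t = "tuition" then followupsTuition
  else if t = "careers" then followupsCareers
  else if t = "visa" then followupsVisa
  else if t = "format" then followupsFormat
  else if t = "capstone" then followupsCapstone
  else followupsDefault

-- TOPICS list of Source B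
def topicsByRank : List String :=
  ["visa", "capstone", "careers", "tuition", "admissions", "format", "curriculum", "default"]

-- KEYWORD_RANK: inverted index keyword → rank, in Source B's (alphabetical) insertion order
def keywordRank : List (String × Nat) :=
  [("admit", 4), ("afford", 3), ("apply", 4), ("capstone", 1), ("career", 2),
   ("chicago", 5), ("core", 6), ("cost", 3), ("course", 6), ("cpt", 0),
   ("curriculum", 6), ("data", 6), ("deadline", 4), ("deep", 6), ("elective", 6),
   ("employer", 2), ("evening", 5), ("f-1", 0), ("fee", 3), ("full-time", 5),
   ("gre", 4), ("hire", 2), ("in-person", 5), ("international", 0), ("job", 2),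
   ("letter", 4), ("machine learning", 6), ("nlp", 6), ("online", 5), ("opt", 0),
   ("outcome", 2), ("part-time", 5), ("price", 3), ("project", 1), ("python", 6),
   ("require", 4), ("salary", 2), ("schedule", 5), ("scholarship", 3), ("showcase", 1),
   ("statement", 4), ("stem", 0), ("study", 5), ("thesis", 1), ("toefl", 4),
   ("tuition", 3), ("visa", 0)]

-- loop body: `if kw in ql and rank < best: best = rank`
def rankStep (ql : String) (best : Nat) (p : String × Nat) : Nat :=
  if PySem.Str.isIn p.1 ql ∧ p.2 < best then p.2 else best

def parse_followups_alt (text : String) (query : String) : String × List String :=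
  let clean : String :=
    if PySem.Str.isIn "FOLLOWUPS:" text then
      PySem.Str.strip (((PySem.Str.split? text "FOLLOWUPS:").getD []).headD "")
    else PySem.Str.strip text
  let ql := PySem.Str.lower query
  let best : Nat := keywordRank.foldl (rankStep ql) 7
  -- TOPICS[best]: best is always in [0,7], so the plain-index read never raises
  (clean, topicFollowups (topicsByRank.getD best ""))

-- ===== PRECONDITION & SPEC =====
def Spec_parse_followups (text : String) (query : String) (out : String × List String) : Prop := out = parse_followups_alt text query
instance (text : String) (query : String) (out : String × List String) : Decidable (Spec_parse_followups text query out) := by unfold Spec_parse_followups; infer_instance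

-- ===== CLAIM (what is proved, stated in full; the proofs are below) =====
def Claim_equal_parse_followups : Prop := ∀ (text : String) (query : String), Dom_parse_followups text query → Spec_parse_followups text query (parse_followups text query)

-- ===== LEMMAS AND PROOFS =====

-- group of keywords all tagged with the same rank
def tagRank (kws : List String) (r : Nat) : List (String × Nat) :=
  kws.map (fun k => (k, r))

-- the inverted index is a permutation of the rank-ordered concatenation of A's groups
theorem keywordRank_perm (ql : String) (acc : Nat) :
    keywordRank.foldl (rankStep ql) acc =
      (tagRank ["visa","opt","stem","f-1","international","cpt"] 0 ++
       tagRank ["capstone","project","showcase","thesis"] 1 ++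
       tagRank ["career","job","outcome","employer","hire","salary"] 2 ++
       tagRank ["cost","tuition","fee","scholarship","price","afford"] 3 ++
       tagRank ["admit","apply","require","letter","statement","deadline","toefl","gre"] 4 ++
       tagRank ["online","in-person","part-time","full-time","schedule","chicago","evening","study"] 5 ++
       tagRank ["course","curriculum","elective","machine learning","python","data","core","nlp","deep"] 6).foldl
        (rankStep ql) acc := by
  refine List.Perm.foldl_eq' (by decide) (fun x _ y _ z => ?_) acc
  cases hx : PySem.Chars.isIn x.1.toList ql.toList <;>
    cases hy : PySem.Chars.isIn y.1.toList ql.toList <;>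
      simp [rankStep, hx, hy] <;> split_ifs <;> omega

-- folding one constant-rank group = conditional min with its `any` test
theorem foldl_tagRank (ql : String) (kws : List String) (r acc : Nat) :
    (tagRank kws r).foldl (rankStep ql) acc =
      if kws.any (fun w => PySem.Str.isIn w ql) then min acc r else acc := by
  induction kws generalizing acc with
  | nil => simp [tagRank]
  | cons k ks ih =>
    simp only [tagRank, List.map, List.foldl, List.any_cons] at *
    rw [ih]
    simp only [rankStep]
    cases hk : PySem.Chars.isIn k.toList ql.toList <;>
      simp [rankStep, hk] <;> split_ifs <;> omega

theorem parse_followups_spec : Claim_equal_parse_followups := by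
  intro text query _
  unfold Spec_parse_followups parse_followups parse_followups_alt
  refine congrArg (Prod.mk _) ?_
  rw [keywordRank_perm]
  simp only [List.foldl_append, foldl_tagRank]
  generalize (["visa","opt","stem","f-1","international","cpt"].any
      (fun w => PySem.Str.isIn w (PySem.Str.lower query))) = b0
  generalize (["capstone","project","showcase","thesis"].any
      (fun w => PySem.Str.isIn w (PySem.Str.lower query))) = b1
  generalize (["career","job","outcome","employer","hire","salary"].any
      (fun w => PySem.Str.isIn w (PySem.Str.lower query))) = b2
  generalize (["cost","tuition","fee","scholarship","price","afford"].any
      (fun w => PySem.Str.isIn w (PySem.Str.lower query))) = b3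
  generalize (["admit","apply","require","letter","statement","deadline","toefl","gre"].any
      (fun w => PySem.Str.isIn w (PySem.Str.lower query))) = b4
  generalize (["online","in-person","part-time","full-time","schedule","chicago","evening","study"].any
      (fun w => PySem.Str.isIn w (PySem.Str.lower query))) = b5
  generalize (["course","curriculum","elective","machine learning","python","data","core","nlp","deep"].any
      (fun w => PySem.Str.isIn w (PySem.Str.lower query))) = b6
  cases b0 <;> cases b1 <;> cases b2 <;> cases b3 <;> cases b4 <;> cases b5 <;> cases b6 <;> rfl
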